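-- pv_equiv track=rewrite | github.com/learn-ukrainian/learn-ukrainian.github.io | scripts/audit_a1_vocab.py | fix_content_formatting
-- ===== SOURCE A (Python) =====
-- def fix_content_formatting(content):
--     """
--     Fixes common formatting issues:
--     - Double headers in tables
--     """
--     lines = content.splitlines()
--     new_lines = []
--
--     i = 0
--     fixed = False
--     while i < len(lines):
--         line = lines[i]
--
--         # Check for double headers
--         if "Word" in line and "IPA" in line and "|" in line:
--             # Check next few lines for a duplicate header
--             # Pattern: Header, Separator, [Header, Separator] -> duplicate
--             if i + 1 < len(lines) and "---" in lines[i+1]: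
--                  if i + 2 < len(lines) and "Word" in lines[i+2] and "IPA" in lines[i+2] and "|" in lines[i+2]:
--                      if i + 3 < len(lines) and "---" in lines[i+3]:
--                          # Found double header, keep first set (i, i+1), skip second set (i+2, i+3)
--                          new_lines.append(lines[i])
--                          new_lines.append(lines[i+1])
--                          i += 4
--                          fixed = True
--                          continue
--
--         new_lines.append(line)
--         i += 1
--
--     return "\n".join(new_lines), fixed
-- ===== SOURCE B (Python) =====
-- def fix_content_formatting(content):
--     """
--     Fixes common formatting issues:
--     - Double headers in tables
--     (streaming rewrite: a single for-loop over the lines with a sliding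
--     window buffer of at most 4 lines, instead of index-jumping while loop)
--     """
--     def is_header(ln):
--         return "Word" in ln and "IPA" in ln and "|" in ln
--
--     def is_sep(ln):
--         return "---" in ln
--
--     out = []
--     buf = []
--     fixed = False
--     for ln in content.splitlines():
--         buf.append(ln)
--         if len(buf) == 4:
--             if is_header(buf[0]) and is_sep(buf[1]) and is_header(buf[2]) and is_sep(buf[3]):
--                 out += buf[:2]
--                 buf = []
--                 fixed = True
--             else:
--                 out.append(buf.pop(0))
--     out += buf
--     return "\n".join(out), fixed
-- ===== Notes on version B (the rewrite author's own statement) =====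
-- stated objective: alternative
-- what changed: A walks the line array by index with conditional i+=4 jumps, appending as it scans; B is a streaming single for-loop over the lines that maintains a sliding window buffer of at most four lines, emitting or collapsing the window as it fills, with no index arithmetic.
import Mathlib
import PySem

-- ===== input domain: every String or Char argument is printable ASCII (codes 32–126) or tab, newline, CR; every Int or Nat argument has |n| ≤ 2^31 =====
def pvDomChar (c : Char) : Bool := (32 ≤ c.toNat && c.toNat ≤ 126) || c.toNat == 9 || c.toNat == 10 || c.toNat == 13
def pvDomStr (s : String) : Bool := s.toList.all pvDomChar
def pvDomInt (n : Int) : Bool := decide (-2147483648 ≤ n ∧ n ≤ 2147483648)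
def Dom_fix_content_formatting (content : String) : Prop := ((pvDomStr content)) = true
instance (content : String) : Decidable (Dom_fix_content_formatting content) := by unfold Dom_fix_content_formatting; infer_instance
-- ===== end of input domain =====

-- B replaces A's index-jumping while-loop with a single streaming pass over the lines
-- carrying a sliding window buffer of at most four lines; objective: alternative, same cost.

-- ===== PORT A =====
-- A's while-loop with state (new_lines = acc, fixed); position i is carried as the suffix
-- lines[i:], so the bound checks i+k < len become list patterns: the catch-all case (fewer
-- than 4 lines left) is where one of A's bound checks fails and the loop appends and advances
def pvLoopA : List String → List String → Bool → List String × Bool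
  | [], acc, fixed => (acc, fixed)
  | l0 :: l1 :: l2 :: l3 :: r4, acc, fixed =>
    if PySem.Str.isIn "Word" l0 && PySem.Str.isIn "IPA" l0 && PySem.Str.isIn "|" l0 then
      if PySem.Str.isIn "---" l1 then
        if PySem.Str.isIn "Word" l2 && PySem.Str.isIn "IPA" l2 && PySem.Str.isIn "|" l2 then
          if PySem.Str.isIn "---" l3 then
            pvLoopA r4 (acc ++ [l0, l1]) true
          else pvLoopA (l1 :: l2 :: l3 :: r4) (acc ++ [l0]) fixed
        else pvLoopA (l1 :: l2 :: l3 :: r4) (acc ++ [l0]) fixed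
      else pvLoopA (l1 :: l2 :: l3 :: r4) (acc ++ [l0]) fixed
    else pvLoopA (l1 :: l2 :: l3 :: r4) (acc ++ [l0]) fixed
  | l0 :: r1, acc, fixed => pvLoopA r1 (acc ++ [l0]) fixed

def fix_content_formatting (content : String) : String × Bool :=
  let lines := PySem.Str.splitlines content
  let r := pvLoopA lines [] false
  (PySem.Str.join "\n" r.1, r.2)

-- ===== PORT B =====
-- B's helpers is_header / is_sep
def pvIsHeader (ln : String) : Bool :=
  PySem.Str.isIn "Word" ln && PySem.Str.isIn "IPA" ln && PySem.Str.isIn "|" ln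

def pvIsSep (ln : String) : Bool := PySem.Str.isIn "---" ln

-- one iteration of B's for-loop: state is (out, buf, fixed)
def pvStepB : List String × List String × Bool → String → List String × List String × Bool
  | (out, buf, fixed), ln =>
    let buf := buf ++ [ln]
    if buf.length == 4 then
      if pvIsHeader (buf.getD 0 "") && pvIsSep (buf.getD 1 "")
          && pvIsHeader (buf.getD 2 "") && pvIsSep (buf.getD 3 "") then
        (out ++ buf.take 2, [], true)
      else
        (out ++ buf.take 1, buf.drop 1, fixed)   -- out.append(buf.pop(0))
    else (out, buf, fixed)

def fix_content_formatting_alt (content : String) : String × Bool :=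
  let st := (PySem.Str.splitlines content).foldl pvStepB ([], [], false)
  (PySem.Str.join "\n" (st.1 ++ st.2.1), st.2.2)

-- ===== PRECONDITION & SPEC =====
def Spec_fix_content_formatting (content : String) (out : String × Bool) : Prop := out = fix_content_formatting_alt content
instance (content : String) (out : String × Bool) : Decidable (Spec_fix_content_formatting content out) := by unfold Spec_fix_content_formatting; infer_instance

-- ===== CLAIM (what is proved, stated in full; the proofs are below) =====
def Claim_equal_fix_content_formatting : Prop := ∀ (content : String), Dom_fix_content_formatting content → Spec_fix_content_formatting content (fix_content_formatting content)

-- ===== LEMMAS AND PROOFS =====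

-- A's nested ifs on a ≥4-line suffix collapse to one boolean condition (B's conjunction)
lemma pvLoopA_four (l0 l1 l2 l3 : String) (r4 acc : List String) (fixed : Bool) :
    pvLoopA (l0 :: l1 :: l2 :: l3 :: r4) acc fixed =
      if pvIsHeader l0 && pvIsSep l1 && pvIsHeader l2 && pvIsSep l3 then
        pvLoopA r4 (acc ++ [l0, l1]) true
      else
        pvLoopA (l1 :: l2 :: l3 :: r4) (acc ++ [l0]) fixed := by
  simp only [pvLoopA]
  split_ifs with h0 h1 h2 h3 <;> simp_all [pvIsHeader, pvIsSep]

-- main invariant: running B's streaming fold from (out, buf, fixed) with |buf| ≤ 3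
-- and flushing the final buffer computes exactly A's loop on buf ++ rest
lemma pv_fold_eq : ∀ (rest : List String) (out buf : List String) (fixed : Bool),
    buf.length ≤ 3 →
    ((rest.foldl pvStepB (out, buf, fixed)).1 ++ (rest.foldl pvStepB (out, buf, fixed)).2.1,
        (rest.foldl pvStepB (out, buf, fixed)).2.2)
      = pvLoopA (buf ++ rest) out fixed := by
  intro rest
  induction rest with
  | nil =>
    intro out buf fixed hlen
    rcases buf with _ | ⟨a, _ | ⟨b, _ | ⟨c, _ | ⟨d, t⟩⟩⟩⟩
    · simp [pvLoopA]
    · simp [pvLoopA]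
    · simp [pvLoopA, List.append_assoc]
    · simp [pvLoopA, List.append_assoc]
    · simp at hlen; omega
  | cons ln rest ih =>
    intro out buf fixed hlen
    rcases buf with _ | ⟨a, _ | ⟨b, _ | ⟨c, _ | ⟨d, t⟩⟩⟩⟩
    · simpa using ih out [ln] fixed (by simp)
    · simpa using ih out [a, ln] fixed (by simp)
    · simpa using ih out [a, b, ln] fixed (by simp)
    · -- buffer fills to four lines: B tests the pattern, A's loop is at the same four lines
      rw [List.foldl_cons]
      have hstep : pvStepB (out, [a, b, c], fixed) ln =
          if pvIsHeader a && pvIsSep b && pvIsHeader c && pvIsSep ln then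
            (out ++ [a, b], [], true)
          else
            (out ++ [a], [b, c, ln], fixed) := by
        simp [pvStepB]
      rw [hstep, show ([a, b, c] : List String) ++ ln :: rest = a :: b :: c :: ln :: rest from rfl,
        pvLoopA_four]
      by_cases hc : (pvIsHeader a && pvIsSep b && pvIsHeader c && pvIsSep ln) = true
      · rw [if_pos hc, if_pos hc]
        simpa using ih (out ++ [a, b]) [] true (by simp)
      · rw [if_neg hc, if_neg hc]
        simpa using ih (out ++ [a]) [b, c, ln] fixed (by simp)
    · simp at hlen; omega

-- ===== VERDICT (by name: the statement is the Claim_ definition above) =====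
theorem fix_content_formatting_spec : Claim_equal_fix_content_formatting := by
  intro content _
  simp only [Spec_fix_content_formatting, fix_content_formatting, fix_content_formatting_alt]
  have h := pv_fold_eq (PySem.Str.splitlines content) [] [] false (by simp)
  simp only [List.nil_append] at h
  rw [← h]
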